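-- pv_equiv track=rewrite | github.com/Ngocnguyen0000/leetcode | LinkedList/4. Merge-Two-Sorted-Linked Lists.py.py | MergeSoft3
-- ===== SOURCE A (Python) =====
-- def MergeSoft3(list1, list2):
--     seen = set()
--     new_list = list1 + list2
--     for item in new_list:
--         if item in seen:
--             return True
--         seen.add(item)
--     return False
-- ===== SOURCE B (Python) =====
-- def MergeSoft3(list1, list2):
--     combined = sorted(list1 + list2)
--     return any(a == b for a, b in zip(combined, combined[1:]))
-- ===== Notes on version B (the rewrite author's own statement) =====
-- stated objective: alternative
-- what changed: Replaces A's hash-set scan with early return by sort-then-adjacent-scan: sort the concatenation and report whether any two neighbours are equal (correct because equal elements are adjacent after sorting; the elements here are integers, so sorting applies).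
import Mathlib
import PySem

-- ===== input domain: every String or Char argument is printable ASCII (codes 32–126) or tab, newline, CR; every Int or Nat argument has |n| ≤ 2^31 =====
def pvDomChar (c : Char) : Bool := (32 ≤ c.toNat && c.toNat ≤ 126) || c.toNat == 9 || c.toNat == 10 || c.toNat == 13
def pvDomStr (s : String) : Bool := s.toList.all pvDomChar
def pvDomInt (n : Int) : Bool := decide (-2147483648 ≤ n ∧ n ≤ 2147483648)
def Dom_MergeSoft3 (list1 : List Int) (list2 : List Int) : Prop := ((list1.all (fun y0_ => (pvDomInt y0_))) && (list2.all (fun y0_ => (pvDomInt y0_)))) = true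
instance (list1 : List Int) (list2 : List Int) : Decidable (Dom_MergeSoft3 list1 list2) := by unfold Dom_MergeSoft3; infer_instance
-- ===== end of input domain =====

-- B replaces A's incremental seen-set loop by sort-then-adjacent-scan: sort the
-- concatenation and check whether any two neighbours are equal (alternative algorithm,
-- O(n log n) vs A's O(n) hash scan).


-- ===== PORT A =====
-- loop of A: for item in new_list: if item in seen: return True; seen.add(item)
def MergeSoft3_loop (seen : PySem.Set Int) : List Int → Bool
  | [] => false
  | item :: rest =>
      if PySem.Set.contains seen item then true
      else MergeSoft3_loop (PySem.Set.add seen item) rest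

def MergeSoft3 (list1 : List Int) (list2 : List Int) : Bool :=
  MergeSoft3_loop PySem.Set.empty (list1 ++ list2)

-- ===== PORT B =====
-- B: combined = sorted(list1 + list2); any(a == b for a, b in zip(combined, combined[1:]))
def MergeSoft3_alt (list1 : List Int) (list2 : List Int) : Bool :=
  let combined := PySem.List.sorted (list1 ++ list2) (fun x => x) false
  (combined.zip combined.tail).any (fun p => p.1 == p.2)

-- ===== PRECONDITION & SPEC =====
def Spec_MergeSoft3 (list1 : List Int) (list2 : List Int) (out : Bool) : Prop := out = MergeSoft3_alt list1 list2
instance (list1 : List Int) (list2 : List Int) (out : Bool) : Decidable (Spec_MergeSoft3 list1 list2 out) := by unfold Spec_MergeSoft3; infer_instance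

-- ===== CLAIM (what is proved, stated in full; the proofs are below) =====
def Claim_equal_MergeSoft3 : Prop := ∀ (list1 : List Int) (list2 : List Int), Dom_MergeSoft3 list1 list2 → Spec_MergeSoft3 list1 list2 (MergeSoft3 list1 list2)

-- ===== LEMMAS AND PROOFS =====

-- A's loop returns false iff the remaining items are distinct and disjoint from 'seen'.
lemma loop_false_iff (l : List Int) (s : PySem.Set Int) :
    MergeSoft3_loop s l = false ↔ l.Nodup ∧ ∀ x ∈ l, x ∉ s := by
  induction l generalizing s with
  | nil => simp [MergeSoft3_loop]
  | cons x rest ih =>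
      simp only [MergeSoft3_loop, List.nodup_cons, List.mem_cons]
      by_cases hc : PySem.Set.contains s x
      · have hmem : x ∈ s := by simpa [PySem.Set.contains_iff] using hc
        simp only [hc, if_true]
        constructor
        · intro h; cases h
        · rintro ⟨_, hall⟩
          exact absurd hmem (hall x (Or.inl rfl))
      · have hmem : x ∉ s := by
          intro h; exact hc (by simpa [PySem.Set.contains_iff] using h)
        simp only [Bool.not_eq_true] at hc
        simp only [hc, Bool.false_eq_true, if_false, ih]
        constructor
        · rintro ⟨hnd, hall⟩
          refine ⟨⟨?_, hnd⟩, ?_⟩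
          · intro hx
            exact absurd (by simp [PySem.Set.mem_add]) (hall x hx)
          · rintro y (rfl | hy)
            · exact hmem
            · intro hys
              exact (hall y hy) (by simp [PySem.Set.mem_add, hys])
        · rintro ⟨⟨hxr, hnd⟩, hall⟩
          refine ⟨hnd, ?_⟩
          intro y hy hys
          rcases (PySem.Set.mem_add ..).mp hys with h | rfl
          · exact hall y (Or.inr hy) h
          · exact hxr hy

-- Adjacent-equality scan on a (≤)-sorted list is false iff the list has no duplicates.
lemma adj_false_iff (l : List Int) (hs : l.Pairwise (· ≤ ·)) :
    ((l.zip l.tail).any (fun p => p.1 == p.2)) = false ↔ l.Nodup := by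
  induction l with
  | nil => simp
  | cons x rest ih =>
      cases rest with
      | nil => simp
      | cons y t =>
          rcases List.pairwise_cons.mp hs with ⟨hx, hrest⟩
          have hxy : x ≤ y := hx y (List.mem_cons_self ..)
          have hih := ih hrest
          simp only [List.tail_cons] at hih ⊢
          simp only [List.zip_cons_cons, List.any_cons, Bool.or_eq_false_iff,
            beq_eq_false_iff_ne, ne_eq]
          rw [hih]
          simp only [List.nodup_cons, List.mem_cons]
          constructor
          · rintro ⟨hne, hyt, hnd⟩
            refine ⟨?_, hyt, hnd⟩
            rintro (rfl | hxt)
            · exact hne rfl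
            · have hyx : y ≤ x := (List.pairwise_cons.mp hrest).1 x hxt
              exact hne (le_antisymm hxy hyx)
          · rintro ⟨hxm, hyt, hnd⟩
            exact ⟨fun h => hxm (Or.inl h), hyt, hnd⟩

-- ===== VERDICT (by name: the statement is the Claim_ definition above) =====
theorem MergeSoft3_spec : Claim_equal_MergeSoft3 := by
  intro list1 list2 _
  unfold Spec_MergeSoft3 MergeSoft3 MergeSoft3_alt
  have hA : MergeSoft3_loop PySem.Set.empty (list1 ++ list2) = false
      ↔ (list1 ++ list2).Nodup := by
    rw [loop_false_iff]
    simp [PySem.Set.empty]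
  have hperm : (PySem.List.sorted (list1 ++ list2) (fun x => x) false).Perm (list1 ++ list2) :=
    PySem.List.sorted_perm _ _ _
  have hpw : (PySem.List.sorted (list1 ++ list2) (fun x => x) false).Pairwise (· ≤ ·) := by
    simpa using PySem.List.sorted_pairwise (xs := list1 ++ list2) (key := fun x => x)
  have hB := adj_false_iff _ hpw
  rw [hperm.nodup_iff] at hB
  simp only []
  cases hvA : MergeSoft3_loop PySem.Set.empty (list1 ++ list2) with
  | false =>
      have := hA.mp hvA
      exact (hB.mpr this).symm
  | true =>
      cases hvB : ((PySem.List.sorted (list1 ++ list2) (fun x => x) false).zip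
          (PySem.List.sorted (list1 ++ list2) (fun x => x) false).tail).any
          (fun p => p.1 == p.2) with
      | true => rfl
      | false =>
          have := hA.mpr (hB.mp hvB)
          rw [hvA] at this
          cases this
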